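-- pv_equiv track=rewrite | github.com/NikitaSLBD/AOIS | Lab1/numbertranslator.py | dec_to_bin_sign
-- ===== SOURCE A (Python) =====
-- def dec_to_bin_sign(dec: int) -> str:
--
--         bin_sign = ""
--         positive_number = abs(dec)
--
--         while (positive_number != 1 and positive_number):
--             bit = str(positive_number % 2)
--             positive_number //= 2
--             bin_sign += bit
--         else: bin_sign += str(positive_number)
--
--         bin_sign = bin_sign[::-1]
--         bin_sign = bin_sign.zfill(31)
--
--         bin_sign = "0" + bin_sign if dec >= 0 else "1" + bin_sign
--         return bin_sign
-- ===== SOURCE B (Python) =====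
-- def dec_to_bin_sign(dec: int) -> str:
--     mag = abs(dec)
--     n = mag.bit_length() or 1
--     digits = ''.join(str((mag >> i) & 1) for i in range(n - 1, -1, -1))
--     return ('0' if dec >= 0 else '1') + digits.zfill(31)
-- ===== Notes on version B (the rewrite author's own statement) =====
-- stated objective: alternative
-- what changed: Replaces the LSB-first repeated mod/floordiv loop with string accumulation, reversal and zfill by a single MSB-first pass that derives the width from bit_length() and reads each bit with shift-and-mask, joining digits directly in output order with no reverse step.
import Mathlib
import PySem

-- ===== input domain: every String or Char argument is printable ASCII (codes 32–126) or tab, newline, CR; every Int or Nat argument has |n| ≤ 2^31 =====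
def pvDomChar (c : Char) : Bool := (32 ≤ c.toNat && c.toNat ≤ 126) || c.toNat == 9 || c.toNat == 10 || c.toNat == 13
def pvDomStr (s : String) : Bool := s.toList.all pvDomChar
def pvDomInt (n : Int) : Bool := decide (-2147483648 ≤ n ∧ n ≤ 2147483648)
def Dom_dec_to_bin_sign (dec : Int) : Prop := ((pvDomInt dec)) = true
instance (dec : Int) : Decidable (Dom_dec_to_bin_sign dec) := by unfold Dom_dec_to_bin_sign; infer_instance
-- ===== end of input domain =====

-- B replaces A's LSB-first mod/div loop + reverse + zfill by an MSB-first shift-and-mask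
-- pass over bit_length() positions (objective: alternative decomposition, no reverse step).

-- ===== PORT A =====
-- the while/else loop; `positive_number = abs(dec) ≥ 0`, so it is carried as a Nat
-- (Python's `//`/`%` agree with Nat `/` and PySem.Int.mod on nonnegative values — exact here);
-- string concatenation is ported at the char-list level (PySem.Int.toChars = str(·)).
def pvLoopA (p : Nat) (acc : List Char) : List Char :=
  if _h : p ≠ 1 ∧ p ≠ 0 then
    pvLoopA (p / 2) (acc ++ PySem.Int.toChars (PySem.Int.mod (p : Int) 2))
  else acc ++ PySem.Int.toChars (p : Int)
termination_by p
decreasing_by exact Nat.div_lt_self (by omega) (by omega)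

def dec_to_bin_sign (dec : Int) : String :=
  let bin_sign := pvLoopA dec.natAbs []          -- the while/else loop, LSB first
  let rev := bin_sign.reverse                    -- bin_sign[::-1] (PySem.List.slice?_none_none_neg_one)
  let z := PySem.Chars.zfill rev 31              -- .zfill(31)
  String.ofList (if dec ≥ 0 then '0' :: z else '1' :: z)

-- ===== PORT B =====
-- mag.bit_length() or 1; then ''.join(str((mag >> i) & 1) for i in range(n-1,-1,-1)),
-- zfill(31), sign prepended; i ≥ 0 throughout the range, so i.toNat is exact.
def dec_to_bin_sign_alt (dec : Int) : String :=
  let mag := dec.natAbs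
  let n := if PySem.Int.bitLength (mag : Int) = 0 then 1 else PySem.Int.bitLength (mag : Int)
  let digits := (PySem.List.pyRange ((n : Int) - 1) (-1) (-1)).flatMap
      (fun i => PySem.Int.toChars (((mag >>> i.toNat) &&& 1 : Nat) : Int))
  String.ofList ((if dec ≥ 0 then '0' else '1') :: PySem.Chars.zfill digits 31)

-- ===== PRECONDITION & SPEC =====
def Spec_dec_to_bin_sign (dec : Int) (out : String) : Prop := out = dec_to_bin_sign_alt dec
instance (dec : Int) (out : String) : Decidable (Spec_dec_to_bin_sign dec out) := by unfold Spec_dec_to_bin_sign; infer_instance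

-- ===== CLAIM (what is proved, stated in full; the proofs are below) =====
def Claim_equal_dec_to_bin_sign : Prop := ∀ (dec : Int), Dom_dec_to_bin_sign dec → Spec_dec_to_bin_sign dec (dec_to_bin_sign dec)

-- ===== LEMMAS AND PROOFS =====

-- the digit str((m >> k) & 1), as a char list
def pvD (m k : Nat) : List Char := PySem.Int.toChars (((m >>> k) &&& 1 : Nat) : Int)

-- n = m.bit_length() or 1
def pvN (m : Nat) : Nat := if PySem.Int.bitLength (m : Int) = 0 then 1 else PySem.Int.bitLength (m : Int)

theorem pvD_eq (m k : Nat) : pvD m k = [if (m >>> k) % 2 = 1 then '1' else '0'] := by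
  unfold pvD
  rw [Nat.and_one_is_mod]
  rcases Nat.mod_two_eq_zero_or_one (m >>> k) with h | h <;> simp [h] <;> decide

theorem pvD_reverse (m k : Nat) : (pvD m k).reverse = pvD m k := by
  rw [pvD_eq]; rfl

theorem pvD_succ (m k : Nat) : pvD m (k + 1) = pvD (m / 2) k := by
  unfold pvD
  congr 2
  simp [Nat.shiftRight_eq_div_pow, Nat.div_div_eq_div_mul, pow_succ]
  ring_nf

theorem pvD_zero (m : Nat) : PySem.Int.toChars (PySem.Int.mod (m : Int) 2) = pvD m 0 := by
  have h : PySem.Int.mod (m : Int) 2 = ((m % 2 : Nat) : Int) := by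
    simp [PySem.Int.mod, Int.fmod_eq_emod]
  rw [h]
  unfold pvD
  congr 2
  simp [Nat.and_one_is_mod]

theorem pvN_step (m : Nat) (h : 2 ≤ m) : pvN m = pvN (m / 2) + 1 := by
  have h1 : PySem.Int.bitLength (m : Int) = PySem.Int.bitLength ((m / 2 : Nat) : Int) + 1 :=
    PySem.Int.bitLength_natCast (by omega)
  have h2 : PySem.Int.bitLength ((m / 2 : Nat) : Int) =
      PySem.Int.bitLength ((m / 2 / 2 : Nat) : Int) + 1 :=
    PySem.Int.bitLength_natCast (by omega)
  unfold pvN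
  rw [h1]
  rw [if_neg (by omega), if_neg (by omega)]

theorem pvLoopA_acc (m : Nat) : ∀ acc, pvLoopA m acc = acc ++ pvLoopA m [] := by
  induction m using Nat.strong_induction_on with
  | _ m ih =>
    intro acc
    conv_lhs => rw [pvLoopA]
    conv_rhs => rw [pvLoopA]
    by_cases h : m ≠ 1 ∧ m ≠ 0
    · rw [dif_pos h, dif_pos h, ih (m / 2) (Nat.div_lt_self (by omega) (by omega)),
        ih (m / 2) (Nat.div_lt_self (by omega) (by omega))]
      simp
      exact (ih (m / 2) (Nat.div_lt_self (by omega) (by omega)) _).symm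
    · rw [dif_neg h, dif_neg h]; simp

theorem pvLoopA_eq (m : Nat) : pvLoopA m [] = (List.range (pvN m)).flatMap (pvD m) := by
  induction m using Nat.strong_induction_on with
  | _ m ih =>
    by_cases h : m ≠ 1 ∧ m ≠ 0
    · have h2 : 2 ≤ m := by omega
      rw [pvLoopA, dif_pos h, pvLoopA_acc, ih (m / 2) (Nat.div_lt_self (by omega) (by omega)),
        pvN_step m h2, List.range_succ_eq_map]
      simp only [List.nil_append, List.flatMap_cons, List.flatMap_map]
      rw [pvD_zero]
      congr 1
      apply List.flatMap_congr
      intro k _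
      exact (pvD_succ m k).symm.trans rfl
    · rw [pvLoopA, dif_neg h]
      rcases (by omega : m = 0 ∨ m = 1) with rfl | rfl <;> decide

theorem pv_range_reverse (n : Nat) :
    (List.range n).reverse = (List.range n).map (fun k => n - 1 - k) := by
  induction n with
  | zero => rfl
  | succ n ih =>
    conv_lhs => rw [List.range_succ]
    conv_rhs => rw [List.range_succ_eq_map]
    rw [List.reverse_append]
    simp only [List.reverse_singleton, List.map_cons, List.map_map, ih, List.singleton_append]
    congr 1
    apply List.map_congr_left
    intro k _
    simp only [Function.comp]
    omega

theorem pv_digits_eq (m : Nat) :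
    (PySem.List.pyRange ((pvN m : Int) - 1) (-1) (-1)).flatMap
        (fun i => PySem.Int.toChars (((m >>> i.toNat) &&& 1 : Nat) : Int)) =
      ((List.range (pvN m)).flatMap (pvD m)).reverse := by
  rw [List.reverse_flatMap, PySem.List.pyRange_neg_one, List.flatMap_map, pv_range_reverse,
    List.flatMap_map]
  have hn : ((pvN m : Int) - 1 - (-1)).toNat = pvN m := by omega
  rw [hn]
  apply List.flatMap_congr
  intro k hk
  have hk' : k < pvN m := List.mem_range.mp hk
  have ht : ((pvN m : Int) - 1 - (k : Int)).toNat = pvN m - 1 - k := by omega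
  simp only [Function.comp, ht]
  rw [pvD_reverse]
  rfl

-- ===== VERDICT (by name: the statement is the Claim_ definition above) =====
theorem dec_to_bin_sign_spec : Claim_equal_dec_to_bin_sign := by
  intro dec _
  unfold Spec_dec_to_bin_sign dec_to_bin_sign dec_to_bin_sign_alt
  simp only
  rw [show (if PySem.Int.bitLength ((dec.natAbs : Nat) : Int) = 0 then 1
        else PySem.Int.bitLength ((dec.natAbs : Nat) : Int)) = pvN dec.natAbs from rfl,
    pv_digits_eq, pvLoopA_eq]
  by_cases h : dec ≥ 0 <;> simp [h]
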